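-- pv_equiv track=rewrite | github.com/supermari0/cs224NFinal | classify.py | pos_bigram_feature_dict
-- ===== SOURCE A (Python) =====
-- def pos_bigram_feature_dict(pos_bigrams_dict, token_tuples):
--     """ Helper function for pos_bigram_features. """
--     for i in range(1, len(token_tuples)):
--         pos = token_tuples[i][1]
--         prev_pos = token_tuples[i-1][1]
--         pos_bigram = prev_pos + '+' + pos
--         if pos_bigram in pos_bigrams_dict:
--             pos_bigrams_dict[pos_bigram] = 1
--     return pos_bigrams_dict
-- ===== SOURCE B (Python) =====
-- def pos_bigram_feature_dict(pos_bigrams_dict, token_tuples):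
--     """ Helper function for pos_bigram_features. """
--     tags = [t[1] for t in token_tuples]
--     present = {a + '+' + b for a, b in zip(tags, tags[1:])}
--     for bigram in list(pos_bigrams_dict):
--         if bigram in present:
--             pos_bigrams_dict[bigram] = 1
--     return pos_bigrams_dict
-- ===== Notes on version B (the rewrite author's own statement) =====
-- stated objective: alternative
-- what changed: Inverted traversal: instead of A's index loop over token pairs testing each bigram against the dict, B builds the set of present bigrams in one zip pass and then marks the dict's keys found in that set.
import Mathlib
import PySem

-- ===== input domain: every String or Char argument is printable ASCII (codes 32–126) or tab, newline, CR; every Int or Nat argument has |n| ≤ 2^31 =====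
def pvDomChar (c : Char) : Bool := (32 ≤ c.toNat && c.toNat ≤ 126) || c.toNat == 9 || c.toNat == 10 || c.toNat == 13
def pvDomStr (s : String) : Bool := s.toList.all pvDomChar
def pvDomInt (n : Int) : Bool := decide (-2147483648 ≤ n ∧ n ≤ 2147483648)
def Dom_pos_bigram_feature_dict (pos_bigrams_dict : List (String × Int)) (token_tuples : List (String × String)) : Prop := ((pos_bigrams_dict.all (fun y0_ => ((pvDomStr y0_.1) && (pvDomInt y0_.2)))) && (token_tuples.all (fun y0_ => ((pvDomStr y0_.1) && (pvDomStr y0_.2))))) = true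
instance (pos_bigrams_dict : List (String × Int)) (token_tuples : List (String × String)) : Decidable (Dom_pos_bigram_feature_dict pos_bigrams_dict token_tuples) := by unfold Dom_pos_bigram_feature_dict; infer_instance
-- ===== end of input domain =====

-- ===== PORT A =====
-- B inverts A's traversal (build the bigram set once, then mark the dict's keys);
-- same return value; note: the Python A mutates pos_bigrams_dict in place and B performs the same mutation.

-- Python `d[k] = v` on the assoc-list representation of a dict: overwrite the first
-- occurrence of the key in place (keeping its position), else append — exact dict-assignment
-- semantics; used by both ports (both Pythons perform dict assignment).
def pySetItem : List (String × Int) → String → Int → List (String × Int)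
  | [], k, v => [(k, v)]
  | (a, w) :: t, k, v => if a == k then (a, v) :: t else (a, w) :: pySetItem t k v

-- indices drawn from range(1, len(token_tuples)) are always in range, so pyGetD is exact here
def pos_bigram_feature_dict (pos_bigrams_dict : List (String × Int)) (token_tuples : List (String × String)) : List (String × Int) :=
  (PySem.List.pyRange 1 (token_tuples.length : Int) 1).foldl
    (fun acc i =>
      let pos := (PySem.List.pyGetD token_tuples i ("", "")).2
      let prev_pos := (PySem.List.pyGetD token_tuples (i - 1) ("", "")).2
      let pos_bigram := prev_pos ++ "+" ++ pos
      if (acc.map (fun kv => kv.1)).contains pos_bigram then pySetItem acc pos_bigram 1 else acc)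
    pos_bigrams_dict

-- ===== PORT B =====
def pos_bigram_feature_dict_alt (pos_bigrams_dict : List (String × Int)) (token_tuples : List (String × String)) : List (String × Int) :=
  let tags := token_tuples.map (fun t => t.2)
  let present : PySem.Set String :=
    PySem.Set.ofList ((tags.zip (PySem.List.slice tags (some 1) none)).map (fun ab => ab.1 ++ "+" ++ ab.2))
  (pos_bigrams_dict.map (fun kv => kv.1)).foldl
    (fun acc bigram => if PySem.Set.contains present bigram then pySetItem acc bigram 1 else acc)
    pos_bigrams_dict

-- ===== PRECONDITION & SPEC =====
def Spec_pos_bigram_feature_dict (pos_bigrams_dict : List (String × Int)) (token_tuples : List (String × String)) (out : List (String × Int)) : Prop := out = pos_bigram_feature_dict_alt pos_bigrams_dict token_tuples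
instance (pos_bigrams_dict : List (String × Int)) (token_tuples : List (String × String)) (out : List (String × Int)) : Decidable (Spec_pos_bigram_feature_dict pos_bigrams_dict token_tuples out) := by unfold Spec_pos_bigram_feature_dict; infer_instance

-- ===== CLAIM (what is proved, stated in full; the proofs are below) =====
def Claim_equal_pos_bigram_feature_dict : Prop := ∀ (pos_bigrams_dict : List (String × Int)) (token_tuples : List (String × String)), Dom_pos_bigram_feature_dict pos_bigrams_dict token_tuples → Spec_pos_bigram_feature_dict pos_bigrams_dict token_tuples (pos_bigram_feature_dict pos_bigrams_dict token_tuples)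

-- ===== LEMMAS AND PROOFS =====

-- Specification of "mark every key satisfying p, first occurrence only": the common shape of both loops.
def mark (p : String → Bool) (seen : List String) : List (String × Int) → List (String × Int)
  | [] => []
  | (k, v) :: t => (if p k ∧ k ∉ seen then (k, 1) else (k, v)) :: mark p (k :: seen) t

lemma mark_congr (p q : String → Bool) (seen : List String) (d : List (String × Int))
    (h : ∀ kv ∈ d, kv.1 ∉ seen → p kv.1 = q kv.1) : mark p seen d = mark q seen d := by
  induction d generalizing seen with
  | nil => rfl
  | cons kv t ih =>
    obtain ⟨k, v⟩ := kv
    have hh := h (k, v) List.mem_cons_self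
    simp only [mark]
    refine congrArg₂ (· :: ·) ?_ (ih (k :: seen) ?_)
    · by_cases hs : k ∈ seen
      · rw [if_neg (by simp [hs]), if_neg (by simp [hs])]
      · rw [hh hs]
    · intro kv hm hns
      exact h kv (List.mem_cons_of_mem _ hm) (fun hc => hns (List.mem_cons_of_mem _ hc))

lemma mark_false (p : String → Bool) (seen : List String) (d : List (String × Int))
    (h : ∀ kv ∈ d, kv.1 ∉ seen → p kv.1 = false) : mark p seen d = d := by
  induction d generalizing seen with
  | nil => rfl
  | cons kv t ih =>
    obtain ⟨k, v⟩ := kv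
    simp only [mark]
    refine congrArg₂ (· :: ·) ?_ (ih (k :: seen) ?_)
    · by_cases hs : k ∈ seen
      · rw [if_neg (by simp [hs])]
      · rw [if_neg (by simp [h (k, v) List.mem_cons_self hs])]
    · intro kv hm hns
      exact h kv (List.mem_cons_of_mem _ hm) (fun hc => hns (List.mem_cons_of_mem _ hc))

lemma keys_pySetItem (d : List (String × Int)) (k : String) (v : Int)
    (h : k ∈ d.map (fun kv => kv.1)) :
    (pySetItem d k v).map (fun kv => kv.1) = d.map (fun kv => kv.1) := by
  induction d with
  | nil => simp at h
  | cons kv t ih =>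
    obtain ⟨a, w⟩ := kv
    by_cases hak : a == k
    · simp [pySetItem, hak]
    · have : k ∈ t.map (fun kv => kv.1) := by
        simp only [List.map_cons, List.mem_cons] at h
        rcases h with h | h
        · exact absurd (by simp [h] : a == k) hak
        · exact h
      simp [pySetItem, hak, ih this]

-- Pushing one guarded dict-assignment (A's loop body) inside `mark`.
lemma mark_setItemIf (p : String → Bool) (seen : List String) (d : List (String × Int))
    (b : String) (hb : b ∉ seen) :
    mark p seen (if (d.map (fun kv => kv.1)).contains b then pySetItem d b 1 else d)
      = mark (fun x => x == b || p x) seen d := by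
  induction d generalizing seen with
  | nil => simp [mark]
  | cons kv t ih =>
    obtain ⟨a, w⟩ := kv
    by_cases hab : a = b
    · subst hab
      rw [if_pos (by simp)]
      simp only [pySetItem, BEq.rfl, if_pos, mark]
      refine congrArg₂ (· :: ·) ?_ ?_
      · simp [hb]
      · refine (mark_congr _ _ _ _ ?_).symm
        intro kv hm hns
        have : ¬ (kv.1 == a) := by
          intro hc
          exact hns (by simp [eq_of_beq hc])
        simp [this]
    · have hne : (a == b) = false := by simp [hab]
      have step : (if ((a, w) :: t).map (fun kv => kv.1) |>.contains b then pySetItem ((a, w) :: t) b 1 else (a, w) :: t)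
          = (a, w) :: (if (t.map (fun kv => kv.1)).contains b then pySetItem t b 1 else t) := by
        by_cases hm : (t.map (fun kv => kv.1)).contains b
        · rw [if_pos (by simp at hm ⊢; exact Or.inr hm), if_pos hm]
          simp [pySetItem, hne]
        · rw [if_neg (by simp [Ne.symm hab]; simpa using hm), if_neg hm]
      rw [step]
      simp only [mark]
      refine congrArg₂ (· :: ·) ?_ (ih (a :: seen) (by simp [hb, Ne.symm hab]))
      by_cases hpa : p a ∧ a ∉ seen
      · rw [if_pos hpa, if_pos ⟨by simp [hpa.1], hpa.2⟩]
      · have hq : ¬ ((a == b || p a) = true ∧ a ∉ seen) := by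
          intro hc
          exact hpa ⟨by simpa [hne] using hc.1, hc.2⟩
        rw [if_neg hpa, if_neg hq]

-- A's loop, folded over an arbitrary list of bigram strings, is `mark` by membership.
lemma foldA (bs : List String) : ∀ d : List (String × Int),
    bs.foldl (fun acc b => if (acc.map (fun kv => kv.1)).contains b then pySetItem acc b 1 else acc) d
      = mark (fun k => bs.contains k) [] d := by
  induction bs with
  | nil =>
    intro d
    exact (mark_false _ _ _ (by simp)).symm
  | cons b bs ih =>
    intro d
    rw [List.foldl_cons, ih, mark_setItemIf _ _ _ _ List.not_mem_nil]
    refine mark_congr _ _ _ _ ?_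
    intro kv _ _
    simp [beq_eq_decide]

-- B's loop over a list of keys of d is `mark` by (key occurs in ks and is present).
lemma foldB (P : String → Bool) : ∀ (ks : List String) (d : List (String × Int)),
    (∀ k ∈ ks, k ∈ d.map (fun kv => kv.1)) →
    ks.foldl (fun acc k => if P k then pySetItem acc k 1 else acc) d
      = mark (fun k => ks.contains k && P k) [] d := by
  intro ks
  induction ks with
  | nil =>
    intro d _
    exact (mark_false _ _ _ (by simp)).symm
  | cons k ks ih =>
    intro d hkeys
    have hk : k ∈ d.map (fun kv => kv.1) := hkeys k List.mem_cons_self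
    by_cases hp : P k
    · rw [List.foldl_cons, if_pos hp,
        ih (pySetItem d k 1) (by
          intro x hx
          rw [keys_pySetItem d k 1 hk]
          exact hkeys x (List.mem_cons_of_mem _ hx))]
      have : pySetItem d k 1 = (if (d.map (fun kv => kv.1)).contains k then pySetItem d k 1 else d) := by
        rw [if_pos (by simpa using hk)]
      rw [this, mark_setItemIf _ _ _ _ List.not_mem_nil]
      refine mark_congr _ _ _ _ ?_
      intro kv _ _
      by_cases hxk : kv.1 = k
      · simp [hxk, hp]
      · simp [hxk]
    · rw [List.foldl_cons, if_neg hp, ih d (fun x hx => hkeys x (List.mem_cons_of_mem _ hx))]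
      refine mark_congr _ _ _ _ ?_
      intro kv _ _
      by_cases hxk : kv.1 = k
      · simp [hxk, hp]
      · simp [hxk]

-- The list of bigram strings A reads off by indexing equals the zip-built list B uses.
lemma bigrams_eq (token_tuples : List (String × String)) :
    (PySem.List.pyRange 1 (token_tuples.length : Int) 1).map
        (fun i => (PySem.List.pyGetD token_tuples (i - 1) ("", "")).2 ++ "+" ++ (PySem.List.pyGetD token_tuples i ("", "")).2)
      = ((token_tuples.map (fun t => t.2)).zip (token_tuples.map (fun t => t.2)).tail).map (fun ab => ab.1 ++ "+" ++ ab.2) := by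
  apply List.ext_getElem
  · simp [PySem.List.length_pyRange_one]
  · intro j h1 h2
    simp only [List.length_map, PySem.List.length_pyRange_one] at h1
    have hj1 : j + 1 < token_tuples.length := by omega
    have hj : j < token_tuples.length := by omega
    rw [List.getElem_map, List.getElem_map, PySem.List.getElem_pyRange_one, List.getElem_zip]
    have e1 : (1 : Int) + (j : Int) - 1 = (j : Int) := by ring
    have e2 : (1 : Int) + (j : Int) = ((j + 1 : Nat) : Int) := by push_cast; ring
    rw [e1, e2, PySem.List.pyGetD_natCast, PySem.List.pyGetD_natCast,
      List.getD_eq_getElem _ _ (by simpa using hj), List.getD_eq_getElem _ _ (by simpa using hj1)]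
    simp [List.getElem_tail]

-- ===== VERDICT (by name: the statement is the Claim_ definition above) =====
theorem pos_bigram_feature_dict_spec : Claim_equal_pos_bigram_feature_dict := by
  intro d tts _
  show pos_bigram_feature_dict d tts = pos_bigram_feature_dict_alt d tts
  have hA : pos_bigram_feature_dict d tts
      = ((PySem.List.pyRange 1 (tts.length : Int) 1).map
          (fun i => (PySem.List.pyGetD tts (i - 1) ("", "")).2 ++ "+" ++ (PySem.List.pyGetD tts i ("", "")).2)).foldl
          (fun acc b => if (acc.map (fun kv => kv.1)).contains b then pySetItem acc b 1 else acc) d := by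
    rw [List.foldl_map]
    rfl
  have hB : pos_bigram_feature_dict_alt d tts
      = (d.map (fun kv => kv.1)).foldl
          (fun acc k => if PySem.Set.contains
              (PySem.Set.ofList (((tts.map (fun t => t.2)).zip (tts.map (fun t => t.2)).tail).map (fun ab => ab.1 ++ "+" ++ ab.2))) k
            then pySetItem acc k 1 else acc) d := by
    show (d.map (fun kv => kv.1)).foldl _ d = _
    rw [PySem.List.slice_from_one]
  rw [hA, hB, bigrams_eq, foldA, foldB _ _ _ (fun k hk => hk)]
  refine mark_congr _ _ _ _ ?_
  intro kv hm _
  have hk : kv.1 ∈ d.map (fun kv => kv.1) := List.mem_map.2 ⟨kv, hm, rfl⟩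
  simp [hk, PySem.Set.contains, PySem.Set.mem_ofList]
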